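-- pv_equiv track=rewrite | github.com/jmoh3/TransitionTreesComplexity | old/original_tree_builder.py | findPivots
-- ===== SOURCE A (Python) =====
-- def findPivots(w, i, j):
--   pivots = []
--
--   for h in range(0, i):
--     if w[h] < w[j]:
--       isValid = True
--       # ensure that all h' (h < h' < i ) satisfies w(h) < w(h') < w(j)
--       for hPrime in range(h, i):
--         if w[h] < w[hPrime] and w[hPrime] < w[j]:
--           isValid = False
--           break
--       if isValid:
--         pivots.append(h)
--
--   return pivots
-- ===== SOURCE B (Python) =====
-- def findPivots(w, i, j):
--   # Right-to-left pass: h is a pivot iff w[h] < w[j] and no later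
--   # index h' < i has w[h] < w[h'] < w[j]; that is exactly "w[h] >= m" where
--   # m is the running max of the values below w[j] seen so far (to the right).
--   if i <= 0:
--     return []
--   wj = w[j]
--   m = None
--   res = []
--   for h in range(i - 1, -1, -1):
--     wh = w[h]
--     if wh < wj:
--       if m is None or m <= wh:
--         res.append(h)
--       if m is None or wh > m:
--         m = wh
--   res.reverse()
--   return res
-- ===== Notes on version B (the rewrite author's own statement) =====
-- stated objective: alternative
-- what changed: Replaces the quadratic inner rescan (for each candidate h, scan all later indices for a value strictly between w[h] and w[j]) by a single right-to-left pass that maintains the running maximum of the values below w[j], so each index is decided in O(1).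
import Mathlib
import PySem

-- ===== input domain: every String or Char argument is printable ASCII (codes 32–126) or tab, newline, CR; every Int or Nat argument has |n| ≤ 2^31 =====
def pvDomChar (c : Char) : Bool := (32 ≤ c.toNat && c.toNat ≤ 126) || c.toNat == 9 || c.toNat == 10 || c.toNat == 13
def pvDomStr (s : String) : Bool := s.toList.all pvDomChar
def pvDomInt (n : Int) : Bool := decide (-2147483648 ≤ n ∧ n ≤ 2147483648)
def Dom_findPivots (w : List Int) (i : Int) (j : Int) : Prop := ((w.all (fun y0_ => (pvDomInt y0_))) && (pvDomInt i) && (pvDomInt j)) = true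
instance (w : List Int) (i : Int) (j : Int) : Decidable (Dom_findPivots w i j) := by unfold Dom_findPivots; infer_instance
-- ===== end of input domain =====

-- B replaces A's quadratic inner rescan by a single right-to-left pass tracking the
-- running maximum of the values below w[j] (objective: alternative algorithm).

-- ===== PORT A =====
def findPivots (w : List Int) (i : Int) (j : Int) : List Int :=
  (PySem.List.pyRange 0 i 1).foldl
    (fun pivots h =>
      if PySem.List.pyGetD w h 0 < PySem.List.pyGetD w j 0 then
        -- inner loop with the isValid flag and break = an existence scan over range(h, i)
        if (PySem.List.pyRange h i 1).any (fun hPrime =>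
              decide (PySem.List.pyGetD w h 0 < PySem.List.pyGetD w hPrime 0) &&
              decide (PySem.List.pyGetD w hPrime 0 < PySem.List.pyGetD w j 0)) then
          pivots
        else pivots ++ [h]
      else pivots)
    []

-- ===== PORT B =====
def findPivots_alt (w : List Int) (i : Int) (j : Int) : List Int :=
  if i ≤ 0 then []
  else
    let wj := PySem.List.pyGetD w j 0
    let st := (PySem.List.pyRange (i - 1) (-1) (-1)).foldl
      (fun (st : Option Int × List Int) h =>
        let wh := PySem.List.pyGetD w h 0
        if wh < wj then
          ((if (match st.1 with | none => true | some m => decide (wh > m)) then some wh else st.1),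
           (if (match st.1 with | none => true | some m => decide (m ≤ wh)) then st.2 ++ [h] else st.2))
        else st)
      (none, [])
    st.2.reverse

-- ===== PRECONDITION & SPEC =====
-- Pre_ excludes exactly the inputs where Python A raises IndexError: when 0 < i the
-- outer loop reads w[0..i-1] (so i must be ≤ len(w)) and w[j] (so j must be a valid
-- possibly-negative index); when i ≤ 0 nothing is read and A returns [].
def Pre_findPivots (w : List Int) (i : Int) (j : Int) : Prop :=
  i ≤ (w.length : Int) ∧ (0 < i → (-(w.length : Int) ≤ j ∧ j < (w.length : Int)))
instance (w : List Int) (i : Int) (j : Int) : Decidable (Pre_findPivots w i j) := by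
  unfold Pre_findPivots; infer_instance

def pvWitness_findPivots : List Int × Int × Int := ([1, 0, 2], 3, 2)

def Spec_findPivots (w : List Int) (i : Int) (j : Int) (out : List Int) : Prop := out = findPivots_alt w i j
instance (w : List Int) (i : Int) (j : Int) (out : List Int) : Decidable (Spec_findPivots w i j out) := by unfold Spec_findPivots; infer_instance

-- ===== CLAIM (what is proved, stated in full; the proofs are below) =====
def Claim_equal_findPivots : Prop := ∀ (w : List Int) (i : Int) (j : Int), Dom_findPivots w i j → Pre_findPivots w i j → Spec_findPivots w i j (findPivots w i j)

-- ===== LEMMAS AND PROOFS =====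

-- w[h] as the ports read it (total form; Pre_ keeps all reads in range in Python)
def wg (w : List Int) (h : Int) : Int := PySem.List.pyGetD w h 0

-- the predicate A's outer loop tests for each h
def Pcond (w : List Int) (i j : Int) (h : Int) : Bool :=
  decide (PySem.List.pyGetD w h 0 < PySem.List.pyGetD w j 0) &&
  !((PySem.List.pyRange h i 1).any (fun hPrime =>
      decide (PySem.List.pyGetD w h 0 < PySem.List.pyGetD w hPrime 0) &&
      decide (PySem.List.pyGetD w hPrime 0 < PySem.List.pyGetD w j 0)))

lemma Pcond_iff (w : List Int) (i j a : Int) :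
    Pcond w i j a = true ↔
      (wg w a < wg w j ∧ ∀ h', a ≤ h' → h' < i → wg w h' < wg w j → wg w h' ≤ wg w a) := by
  simp only [Pcond, wg, Bool.and_eq_true, decide_eq_true_eq, Bool.not_eq_true', List.any_eq_false,
    PySem.List.mem_pyRange_one]
  constructor
  · rintro ⟨h1, h2⟩
    refine ⟨h1, fun h' ha hi hlt => ?_⟩
    have h3 := h2 h' ⟨ha, hi⟩
    by_cases hx : PySem.List.pyGetD w a 0 < PySem.List.pyGetD w h' 0
    · exact absurd (And.intro hx hlt) h3
    · omega
  · rintro ⟨h1, h2⟩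
    refine ⟨h1, fun h' hmem => ?_⟩
    rintro ⟨hx, hlt⟩
    have := h2 h' hmem.1 hmem.2 hlt
    omega

lemma A_filter (w : List Int) (i j : Int) :
    findPivots w i j = (PySem.List.pyRange 0 i 1).filter (Pcond w i j) := by
  unfold findPivots
  have hbody : (fun (pivots : List Int) h =>
      if PySem.List.pyGetD w h 0 < PySem.List.pyGetD w j 0 then
        if (PySem.List.pyRange h i 1).any (fun hPrime =>
              decide (PySem.List.pyGetD w h 0 < PySem.List.pyGetD w hPrime 0) &&
              decide (PySem.List.pyGetD w hPrime 0 < PySem.List.pyGetD w j 0)) then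
          pivots
        else pivots ++ [h]
      else pivots)
      = (fun (pivots : List Int) h => if Pcond w i j h then pivots ++ [h] else pivots) := by
    funext pivots h
    unfold Pcond
    by_cases h1 : PySem.List.pyGetD w h 0 < PySem.List.pyGetD w j 0 <;>
      cases h2 : (PySem.List.pyRange h i 1).any (fun hPrime =>
              decide (PySem.List.pyGetD w h 0 < PySem.List.pyGetD w hPrime 0) &&
              decide (PySem.List.pyGetD w hPrime 0 < PySem.List.pyGetD w j 0)) <;>
      simp [h1]
  rw [hbody]
  simpa using PySem.List.foldl_append_if (Pcond w i j) id (PySem.List.pyRange 0 i 1) []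

-- invariant for the Option Int accumulator of B's single pass
def Good (w : List Int) (i j a : Int) (o : Option Int) : Prop :=
  (∀ h', a ≤ h' → h' < i → wg w h' < wg w j → ∃ m, o = some m ∧ wg w h' ≤ m) ∧
  (∀ m, o = some m → m < wg w j ∧ ∃ h', a ≤ h' ∧ h' < i ∧ wg w h' = m)

-- the foldr form of B's loop body (B folds its lambda from the left over the
-- countdown range, i.e. foldr of the flipped lambda over the increasing range)
def Bstep (w : List Int) (j : Int) (h : Int) (st : Option Int × List Int) : Option Int × List Int :=
  let wh := PySem.List.pyGetD w h 0
  if wh < PySem.List.pyGetD w j 0 then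
    ((if (match st.1 with | none => true | some m => decide (wh > m)) then some wh else st.1),
     (if (match st.1 with | none => true | some m => decide (m ≤ wh)) then st.2 ++ [h] else st.2))
  else st

lemma Binv (w : List Int) (i j : Int) : ∀ (n : Nat) (a : Int), i - a ≤ (n : Int) →
    Good w i j a ((PySem.List.pyRange a i 1).foldr (Bstep w j) (none, [])).1 ∧
    ((PySem.List.pyRange a i 1).foldr (Bstep w j) (none, [])).2
      = ((PySem.List.pyRange a i 1).filter (Pcond w i j)).reverse := by
  intro n
  induction n with
  | zero =>
    intro a ha
    rw [PySem.List.pyRange_one_eq_nil (by omega)]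
    exact ⟨⟨fun h' h1 h2 _ => absurd h2 (by omega), fun m hm => by simp at hm⟩, rfl⟩
  | succ n ih =>
    intro a ha
    by_cases hai : i ≤ a
    · rw [PySem.List.pyRange_one_eq_nil hai]
      exact ⟨⟨fun h' h1 h2 _ => absurd h2 (by omega), fun m hm => by simp at hm⟩, rfl⟩
    · rw [not_le] at hai
      rw [PySem.List.pyRange_one_cons hai]
      obtain ⟨G, hres⟩ := ih (a + 1) (by omega)
      set st' := (PySem.List.pyRange (a + 1) i 1).foldr (Bstep w j) (none, []) with hst'
      rw [List.foldr_cons, List.filter_cons, ← hst']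
      by_cases h1 : wg w a < wg w j
      · -- a's value is below w[j]
        rcases ho : st'.1 with _ | m
        · -- no value below w[j] seen yet: a is a pivot, new max is w[a]
          have hstep : Bstep w j a st' = (some (wg w a), st'.2 ++ [a]) := by
            unfold Bstep; rw [ho]; simp [wg] at h1 ⊢; simp [h1]
          have hP : Pcond w i j a = true := by
            rw [Pcond_iff]
            refine ⟨h1, fun h' hh1 hh2 hh3 => ?_⟩
            by_cases he : h' = a
            · subst he; omega
            · obtain ⟨m, hm, _⟩ := G.1 h' (by omega) hh2 hh3
              rw [ho] at hm; exact absurd hm (by simp)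
          rw [hstep, hP, if_pos rfl]
          refine ⟨⟨fun h' hh1 hh2 hh3 => ?_, fun m hm => ?_⟩, by rw [List.reverse_cons, hres]⟩
          · by_cases he : h' = a
            · subst he; exact ⟨wg w h', rfl, le_refl _⟩
            · obtain ⟨m, hm, _⟩ := G.1 h' (by omega) hh2 hh3
              rw [ho] at hm; exact absurd hm (by simp)
          · simp only [Option.some.injEq] at hm
            exact ⟨by omega, a, le_refl a, hai, by rw [hm]⟩
        · -- running max m of the values below w[j] seen so far
          have hm' := G.2 m ho
          by_cases h2 : m ≤ wg w a
          · -- a is a pivot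
            have hP : Pcond w i j a = true := by
              rw [Pcond_iff]
              refine ⟨h1, fun h' hh1 hh2 hh3 => ?_⟩
              by_cases he : h' = a
              · subst he; omega
              · obtain ⟨m'', hm'', hle⟩ := G.1 h' (by omega) hh2 hh3
                rw [ho] at hm''; simp only [Option.some.injEq] at hm''; omega
            by_cases h3 : wg w a > m
            · have hstep : Bstep w j a st' = (some (wg w a), st'.2 ++ [a]) := by
                unfold Bstep; rw [ho]; simp [wg] at h1 h2 h3 ⊢; simp [h1, h2, h3]
              rw [hstep, hP, if_pos rfl]
              refine ⟨⟨fun h' hh1 hh2 hh3 => ?_, fun m'' hm'' => ?_⟩,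
                by rw [List.reverse_cons, hres]⟩
              · by_cases he : h' = a
                · subst he; exact ⟨wg w h', rfl, le_refl _⟩
                · obtain ⟨m'', hm'', hle⟩ := G.1 h' (by omega) hh2 hh3
                  rw [ho] at hm''; simp only [Option.some.injEq] at hm''
                  exact ⟨wg w a, rfl, by omega⟩
              · simp only [Option.some.injEq] at hm''
                exact ⟨by omega, a, le_refl a, hai, by omega⟩
            · have hstep : Bstep w j a st' = (some m, st'.2 ++ [a]) := by
                unfold Bstep; rw [ho]; simp [wg] at h1 h2 h3 ⊢; simp [h1, h2, h3]
              rw [hstep, hP, if_pos rfl]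
              refine ⟨⟨fun h' hh1 hh2 hh3 => ?_, fun m'' hm'' => ?_⟩,
                by rw [List.reverse_cons, hres]⟩
              · by_cases he : h' = a
                · subst he; exact ⟨m, rfl, by omega⟩
                · obtain ⟨m'', hm'', hle⟩ := G.1 h' (by omega) hh2 hh3
                  rw [ho] at hm''; simp only [Option.some.injEq] at hm''
                  exact ⟨m, rfl, by omega⟩
              · simp only [Option.some.injEq] at hm''
                obtain ⟨hlt, h', hh⟩ := hm'
                exact ⟨by omega, h', by omega⟩
          · -- some later value lies strictly between w[a] and w[j]: a is not a pivot
            have hP : Pcond w i j a = false := by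
              rw [Bool.eq_false_iff, Ne, Pcond_iff]
              rintro ⟨_, hall⟩
              obtain ⟨hlt, h', hh1, hh2, hh3⟩ := hm'
              have := hall h' (by omega) hh2 (by omega)
              omega
            have h3 : ¬ PySem.List.pyGetD w a 0 > m := by simp [wg] at h2; omega
            have hstep : Bstep w j a st' = (some m, st'.2) := by
              unfold Bstep; rw [ho]; simp [wg] at h1 h2 ⊢; simp [h1, h3, h2]
            rw [hstep, hP]
            refine ⟨⟨fun h' hh1 hh2 hh3 => ?_, fun m'' hm'' => ?_⟩, by simp [hres]⟩
            · by_cases he : h' = a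
              · subst he; exact ⟨m, rfl, by omega⟩
              · obtain ⟨m'', hm'', hle⟩ := G.1 h' (by omega) hh2 hh3
                rw [ho] at hm''; simp only [Option.some.injEq] at hm''
                exact ⟨m, rfl, by omega⟩
            · simp only [Option.some.injEq] at hm''
              obtain ⟨hlt, h', hh⟩ := hm'
              exact ⟨by omega, h', by omega⟩
      · -- w[a] is not below w[j]: state unchanged, a is not a pivot
        have hP : Pcond w i j a = false := by
          rw [Bool.eq_false_iff, Ne, Pcond_iff]
          rintro ⟨hh, _⟩; omega
        have hstep : Bstep w j a st' = st' := by
          unfold Bstep; simp [wg] at h1; simp [h1]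
        rw [hstep, hP]
        refine ⟨⟨fun h' hh1 hh2 hh3 => ?_, fun m hm => ?_⟩, by simp [hres]⟩
        · have he : h' ≠ a := by intro he; subst he; omega
          exact G.1 h' (by omega) hh2 hh3
        · obtain ⟨hlt, h', hh⟩ := G.2 m hm
          exact ⟨hlt, h', by omega⟩

lemma B_filter (w : List Int) (i j : Int) :
    findPivots_alt w i j = (PySem.List.pyRange 0 i 1).filter (Pcond w i j) := by
  unfold findPivots_alt
  by_cases hi : i ≤ 0
  · rw [if_pos hi, PySem.List.pyRange_one_eq_nil hi, List.filter_nil]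
  · rw [if_neg hi]
    have hrev : PySem.List.pyRange (i - 1) (-1) (-1) = (PySem.List.pyRange 0 i 1).reverse := by
      rw [PySem.List.pyRange_neg_one_eq_reverse]; norm_num
    rw [hrev]
    show (List.foldl
        (fun (st : Option Int × List Int) h =>
          let wh := PySem.List.pyGetD w h 0
          if wh < PySem.List.pyGetD w j 0 then
            ((if (match st.1 with | none => true | some m => decide (wh > m)) then some wh else st.1),
             (if (match st.1 with | none => true | some m => decide (m ≤ wh)) then st.2 ++ [h] else st.2))
          else st)
        (none, []) (PySem.List.pyRange 0 i 1).reverse).2.reverse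
      = (PySem.List.pyRange 0 i 1).filter (Pcond w i j)
    rw [List.foldl_reverse]
    have hfun : (fun (x : Int) (y : Option Int × List Int) =>
        (fun (st : Option Int × List Int) h =>
          let wh := PySem.List.pyGetD w h 0
          if wh < PySem.List.pyGetD w j 0 then
            ((if (match st.1 with | none => true | some m => decide (wh > m)) then some wh else st.1),
             (if (match st.1 with | none => true | some m => decide (m ≤ wh)) then st.2 ++ [h] else st.2))
          else st) y x) = Bstep w j := by
      funext x y; rfl
    rw [hfun, (Binv w i j i.toNat 0 (by omega)).2, List.reverse_reverse]

-- ===== VERDICT (by name: the statement is the Claim_ definition above) =====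
theorem findPivots_spec : Claim_equal_findPivots := by
  intro w i j _ _
  unfold Spec_findPivots
  rw [A_filter, B_filter]
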